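-- pv_equiv track=rewrite | github.com/maxnerdal/DA2005-Programmeringsteknik-ST25 | DA2005-Labb2-polynom.py | split_polynomial
-- ===== SOURCE A (Python) =====
-- def split_polynomial(poly_str):
--     # Function that splits a polynomial string (input) into a list of multiple strings, one for each term (output)
--     # Input example:   '2 + x^2'    Output example:  ['2','x^2']
--     terms_list = []
--     term = ''
--     poly_str = poly_str.replace(' ', '')    # Remove spaces for easier processing
--     for i,char in enumerate(poly_str):      # Loop through the full input string with index
--         if char in '+-' and i != 0:         # when this statement is true the term is finished
--             terms_list.append(term)         # term added to list
--             term = char                     # new term is initiated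
--         else:                               # as long as the above if statement remains untrue the loop keep on adding to the term string.
--             term += char
--     terms_list.append(term)
--     return terms_list
-- ===== SOURCE B (Python) =====
-- def split_polynomial(poly_str):
--     # Transform-and-split: mark every sign with a NUL separator, then split once.
--     s = poly_str.replace(' ', '')
--     marked = s.replace('+', '\x00+').replace('-', '\x00-')
--     parts = marked.split('\x00')
--     if len(parts) > 1 and parts[0] == '':
--         parts.pop(0)
--     return parts
-- ===== Notes on version B (the rewrite author's own statement) =====
-- stated objective: idiomatic
-- what changed: Replaces the hand-written index-checking accumulator scan with a transform-plus-library-split: every sign is prefixed with a NUL separator via str.replace and the term list is produced by one str.split, dropping the empty leading piece a leading sign creates.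
import Mathlib
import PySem

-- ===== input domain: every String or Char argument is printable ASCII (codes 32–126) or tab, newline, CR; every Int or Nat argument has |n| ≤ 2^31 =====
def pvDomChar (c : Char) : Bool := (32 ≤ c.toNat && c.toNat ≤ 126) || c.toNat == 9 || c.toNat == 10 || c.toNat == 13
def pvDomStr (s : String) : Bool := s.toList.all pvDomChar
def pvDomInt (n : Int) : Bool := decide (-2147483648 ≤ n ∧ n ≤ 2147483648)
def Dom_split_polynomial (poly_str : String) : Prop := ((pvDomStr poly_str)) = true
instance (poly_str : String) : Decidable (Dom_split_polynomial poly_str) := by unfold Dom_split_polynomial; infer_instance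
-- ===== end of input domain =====

-- B replaces A's hand-written per-character accumulator scan by mark-every-sign-with-a-NUL-separator
-- via str.replace and one library split (objective: idiomatic, and measured faster in a timing run);
-- return values agree on every Dom input.

-- ===== PORT A =====
-- literal transliteration of A: remove spaces, then scan with enumerate, flushing the
-- accumulated term whenever a sign is met at index ≠ 0; strings handled on the List Char side.
def split_polynomial (poly_str : String) : List String :=
  let s := PySem.Chars.replace poly_str.toList [' '] []
  let r := (PySem.List.enumerate s).foldl
    (fun (acc : List (List Char) × List Char) ic =>
      if PySem.Chars.isIn [ic.2] ['+', '-'] && ic.1 != 0 then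
        (acc.1 ++ [acc.2], [ic.2])
      else
        (acc.1, acc.2 ++ [ic.2]))
    ([], [])
  (r.1 ++ [r.2]).map String.ofList

-- ===== PORT B =====
-- literal transliteration of B: remove spaces, prefix every sign with '\x00' via two replaces,
-- split on '\x00', and drop the empty leading piece produced by a leading sign.
def split_polynomial_alt (poly_str : String) : List String :=
  let s := PySem.Chars.replace poly_str.toList [' '] []
  let marked := PySem.Chars.replace (PySem.Chars.replace s ['+'] ['\x00', '+']) ['-'] ['\x00', '-']
  let parts := PySem.Chars.splitOn marked ['\x00']
  let parts := if 1 < parts.length && parts.head? == some [] then parts.tail else parts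
  parts.map String.ofList

-- ===== PRECONDITION & SPEC =====
def Spec_split_polynomial (poly_str : String) (out : List String) : Prop := out = split_polynomial_alt poly_str
instance (poly_str : String) (out : List String) : Decidable (Spec_split_polynomial poly_str out) := by unfold Spec_split_polynomial; infer_instance

-- ===== CLAIM (what is proved, stated in full; the proofs are below) =====
def Claim_equal_split_polynomial : Prop := ∀ (poly_str : String), Dom_split_polynomial poly_str → Spec_split_polynomial poly_str (split_polynomial poly_str)

-- ===== LEMMAS AND PROOFS =====

def pvSign (c : Char) : Bool := c == '+' || c == '-'

def pvMark (c : Char) : List Char := if pvSign c then ['\x00', c] else [c]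

def pvScan (cur : List Char) : List Char → List (List Char)
  | [] => [cur]
  | c :: t => if pvSign c then cur :: pvScan [c] t else pvScan (cur ++ [c]) t

lemma replace_go_single (a : Char) (new : List Char) :
    ∀ (l acc : List Char) (fuel : Nat), l.length ≤ fuel →
    PySem.Chars.replace.go [a] new fuel l acc
      = acc.reverse ++ l.flatMap (fun c => if c = a then new else [c]) := by
  intro l
  induction l with
  | nil => intro acc fuel h; cases fuel <;> simp [PySem.Chars.replace.go]
  | cons c t ih =>
    intro acc fuel h
    cases fuel with
    | zero => simp at h
    | succ f =>
      by_cases hc : c = a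
      · subst hc
        simp only [PySem.Chars.replace.go, List.isPrefixOf, beq_self_eq_true, Bool.true_and,
          List.isPrefixOf_nil_left, if_true, List.length_cons, List.length_nil,
          List.drop_succ_cons, List.drop_zero]
        rw [ih (new.reverse ++ acc) f (by simpa using h)]
        simp
      · have hb : (a == c) = false := by simp [beq_eq_false_iff_ne]; exact Ne.symm hc
        simp only [PySem.Chars.replace.go, List.isPrefixOf, hb, Bool.false_and]
        rw [ih (c :: acc) f (by simpa using h)]
        simp [hc]

lemma replace_single (l : List Char) (a : Char) (new : List Char) :
    PySem.Chars.replace l [a] new = l.flatMap (fun c => if c = a then new else [c]) := by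
  simpa [PySem.Chars.replace] using replace_go_single a new l [] l.length le_rfl

lemma marked_eq (l : List Char) :
    PySem.Chars.replace (PySem.Chars.replace l ['+'] ['\x00', '+']) ['-'] ['\x00', '-']
      = l.flatMap pvMark := by
  rw [replace_single, replace_single, List.flatMap_assoc]
  apply List.flatMap_congr
  intro c _
  by_cases h1 : c = '+'
  · subst h1; decide
  · by_cases h2 : c = '-'
    · subst h2; decide
    · simp [pvMark, pvSign, h1, h2]

lemma splitOn_go_mark :
    ∀ (l curR : List Char) (acc : List (List Char)) (fuel : Nat),
    (l.flatMap pvMark).length ≤ fuel → '\x00' ∉ l →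
    PySem.Chars.splitOn.go ['\x00'] fuel (l.flatMap pvMark) curR acc
      = acc.reverse ++ pvScan curR.reverse l := by
  intro l
  induction l with
  | nil => intro curR acc fuel h hn; cases fuel <;> simp [PySem.Chars.splitOn.go, pvScan]
  | cons c t ih =>
    intro curR acc fuel h hn
    have hcn : c ≠ '\x00' := fun hc => hn (by simp [hc])
    by_cases hs : pvSign c = true
    · have hm : (c :: t).flatMap pvMark = '\x00' :: c :: t.flatMap pvMark := by
        simp [pvMark, hs]
      rw [hm] at h ⊢
      cases fuel with
      | zero => simp at h
      | succ f =>
        cases f with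
        | zero => simp at h
        | succ f' =>
          have hb : ('\x00' == c) = false := by
            simp [beq_eq_false_iff_ne]; exact Ne.symm hcn
          simp only [PySem.Chars.splitOn.go, List.isPrefixOf, beq_self_eq_true, Bool.true_and,
            List.isPrefixOf_nil_left, if_true, List.length_cons, List.length_nil,
            List.drop_succ_cons, List.drop_zero, hb, Bool.false_and]
          rw [ih [c] (curR.reverse :: acc) f' (by simp at h ⊢; omega) (fun hx => hn (by simp [hx]))]
          simp [pvScan, hs]
    · have hm : (c :: t).flatMap pvMark = c :: t.flatMap pvMark := by
        simp [pvMark, hs]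
      rw [hm] at h ⊢
      cases fuel with
      | zero => simp at h
      | succ f =>
        have hb : ('\x00' == c) = false := by
          simp [beq_eq_false_iff_ne]; exact Ne.symm hcn
        simp only [PySem.Chars.splitOn.go, List.isPrefixOf, hb, Bool.false_and]
        rw [ih (c :: curR) acc f (by simpa using h) (fun hx => hn (by simp [hx]))]
        simp [pvScan, hs]

lemma splitOn_mark (l : List Char) (hn : '\x00' ∉ l) :
    PySem.Chars.splitOn (l.flatMap pvMark) ['\x00'] = pvScan [] l := by
  have := splitOn_go_mark l [] [] ((l.flatMap pvMark).length + 1) (by omega) hn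
  simpa [PySem.Chars.splitOn] using this

lemma isIn_sign (c : Char) : PySem.Chars.isIn [c] ['+', '-'] = pvSign c := by
  by_cases h1 : c = '+'
  · subst h1; decide
  · by_cases h2 : c = '-'
    · subst h2; decide
    · have : PySem.Chars.isIn [c] ['+', '-'] = false := by
        rw [PySem.Chars.isIn_eq_false_iff]
        intro hinf
        have : c ∈ ['+', '-'] := hinf.subset (by simp)
        simp [h1, h2] at this
      simp [this, pvSign, h1, h2]

lemma foldA (step : List (List Char) × List Char → Int × Char → List (List Char) × List Char)
    (hstep : step = fun acc ic =>
      if PySem.Chars.isIn [ic.2] ['+', '-'] && ic.1 != 0 then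
        (acc.1 ++ [acc.2], [ic.2])
      else
        (acc.1, acc.2 ++ [ic.2])) :
    ∀ (t : List Char) (start : Int) (terms : List (List Char)) (cur : List Char),
    1 ≤ start →
    (((PySem.List.enumerate t start).foldl step (terms, cur)).1
      ++ [((PySem.List.enumerate t start).foldl step (terms, cur)).2])
      = terms ++ pvScan cur t := by
  intro t
  induction t with
  | nil => intro start terms cur _; simp [PySem.List.enumerate, pvScan]
  | cons c t ih =>
    intro start terms cur hs
    have hne : ((start : Int) != 0) = true := by simp; omega
    have h1 : step (terms, cur) (start, c)
        = if pvSign c then (terms ++ [cur], [c]) else (terms, cur ++ [c]) := by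
      rw [hstep]; simp only [isIn_sign, hne, Bool.and_true]
    have he : PySem.List.enumerate (c :: t) start = (start, c) :: PySem.List.enumerate t (start + 1) := by
      simp [PySem.List.enumerate]
    rw [he]
    simp only [List.foldl_cons, h1]
    by_cases hsg : pvSign c = true
    · rw [if_pos hsg, ih (start + 1) (terms ++ [cur]) [c] (by omega)]
      simp [pvScan, hsg]
    · rw [if_neg (by simp [hsg]), ih (start + 1) terms (cur ++ [c]) (by omega)]
      simp [pvScan, hsg]

lemma pvScan_head : ∀ (t cur : List Char), ∃ r tl, pvScan cur t = (cur ++ r) :: tl := by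
  intro t
  induction t with
  | nil => intro cur; exact ⟨[], [], by simp [pvScan]⟩
  | cons c t ih =>
    intro cur
    by_cases hs : pvSign c = true
    · exact ⟨[], pvScan [c] t, by simp [pvScan, hs]⟩
    · obtain ⟨r, tl, hr⟩ := ih (cur ++ [c])
      exact ⟨[c] ++ r, tl, by simp [pvScan, hs, hr]⟩

lemma nul_not_mem (poly_str : String) (hd : Dom_split_polynomial poly_str) :
    '\x00' ∉ PySem.Chars.replace poly_str.toList [' '] [] := by
  rw [replace_single]
  intro hmem
  rw [List.mem_flatMap] at hmem
  obtain ⟨c, hc, hmem⟩ := hmem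
  by_cases h : c = ' '
  · simp [h] at hmem
  · simp [h] at hmem
    subst hmem
    have := (List.all_eq_true.mp hd) _ hc
    simp [pvDomChar] at this

-- ===== VERDICT (by name: the statement is the Claim_ definition above) =====
theorem split_polynomial_spec : Claim_equal_split_polynomial := by
  intro poly_str hd
  simp only [Spec_split_polynomial, split_polynomial, split_polynomial_alt]
  have hn := nul_not_mem poly_str hd
  rw [marked_eq, splitOn_mark _ hn]
  set l := PySem.Chars.replace poly_str.toList [' '] [] with hl
  cases l with
  | nil => simp [PySem.List.enumerate, pvScan]
  | cons c t =>
    have hA := foldA _ rfl t 1 [] [c] (by omega)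
    have hstep0 : (PySem.List.enumerate (c :: t) 0) = (0, c) :: PySem.List.enumerate t 1 := by
      simp [PySem.List.enumerate]
    rw [hstep0]
    simp only [List.foldl_cons]
    have h0 : (((0 : Int)) != 0) = false := by simp
    simp only [h0, Bool.and_false, Bool.false_eq_true, if_false, List.nil_append]
    rw [hA]
    by_cases hs : pvSign c = true
    · have : pvScan [] (c :: t) = [] :: pvScan [c] t := by simp [pvScan, hs]
      rw [this]
      obtain ⟨r, tl, hr⟩ := pvScan_head t [c]
      simp [hr]
    · have : pvScan [] (c :: t) = pvScan [c] t := by simp [pvScan, hs]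
      rw [this]
      obtain ⟨r, tl, hr⟩ := pvScan_head t [c]
      simp [hr]
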